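-- pv_equiv track=rewrite | github.com/jgibson2/TFAinference_nonlinear | archive/mysticRealMain.py | createParamsUpdate1
-- ===== SOURCE A (Python) =====
-- def createParamsUpdate1(signedBinaryCS, binaryTFA):
--     params = []
--     numGenes = len(signedBinaryCS)
--     numTFs = len(signedBinaryCS[0])
--     numSamples = len(binaryTFA[0])
--     for i in range(numSamples):
--         for j in range(numGenes):
--             numRepressors = 0
--             if i == 1:
--                 params.append("s[" + str(j) + "]")
--             for k in range(numTFs):
--                 if signedBinaryCS[j][k] < 0:
--                     numRepressors += 1
--                 if j == 0:
--                     if binaryTFA[k][i] != 0: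
--                         params.append("tfa[" + str(k) + "," + str(i) + "]")
--                 if i == 0:
--                     if signedBinaryCS[j][k] != 0:
--                         params.append("cs[" + str(j) + "," + str(k) + "]")
--             if i == 0:
--                 if numRepressors == 0:
--                     params.append("b[" + str(j) + "]")
--     return params
-- ===== SOURCE B (Python) =====
-- def createParamsUpdate1(signedBinaryCS, binaryTFA):
--     numGenes = len(signedBinaryCS)
--     numTFs = len(signedBinaryCS[0])
--     numSamples = len(binaryTFA[0])
--     params = []
--     # sample 0: tfa/cs parameters (interleaved per TF for gene 0) and basal b's
--     if numSamples > 0: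
--         for j in range(numGenes):
--             row = signedBinaryCS[j]
--             if j == 0:
--                 for k in range(numTFs):
--                     if binaryTFA[k][0] != 0:
--                         params.append("tfa[%d,0]" % k)
--                     if row[k] != 0:
--                         params.append("cs[0,%d]" % k)
--             else:
--                 params.extend("cs[%d,%d]" % (j, k)
--                               for k in range(numTFs) if row[k] != 0)
--             if all(row[k] >= 0 for k in range(numTFs)):
--                 params.append("b[%d]" % j)
--     # sample 1: scale parameters s[j], plus tfa column 1 right after s[0]
--     if numSamples > 1:
--         for j in range(numGenes):
--             params.append("s[%d]" % j)
--             if j == 0: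
--                 params.extend("tfa[%d,1]" % k
--                               for k in range(numTFs) if binaryTFA[k][1] != 0)
--     # samples >= 2: only the tfa columns
--     for i in range(2, numSamples):
--         params.extend("tfa[%d,%d]" % (k, i)
--                       for k in range(numTFs) if binaryTFA[k][i] != 0)
--     return params
-- ===== Notes on version B (the rewrite author's own statement) =====
-- stated objective: faster
-- what changed: Instead of A's triple loop over all (sample, gene, TF) triples, B emits directly the three blocks that actually produce parameters (sample-0 tfa/cs/b block, sample-1 s/tfa block, tfa columns for samples >= 2), skipping the empty gene x TF iterations for every later sample.
import Mathlib
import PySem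

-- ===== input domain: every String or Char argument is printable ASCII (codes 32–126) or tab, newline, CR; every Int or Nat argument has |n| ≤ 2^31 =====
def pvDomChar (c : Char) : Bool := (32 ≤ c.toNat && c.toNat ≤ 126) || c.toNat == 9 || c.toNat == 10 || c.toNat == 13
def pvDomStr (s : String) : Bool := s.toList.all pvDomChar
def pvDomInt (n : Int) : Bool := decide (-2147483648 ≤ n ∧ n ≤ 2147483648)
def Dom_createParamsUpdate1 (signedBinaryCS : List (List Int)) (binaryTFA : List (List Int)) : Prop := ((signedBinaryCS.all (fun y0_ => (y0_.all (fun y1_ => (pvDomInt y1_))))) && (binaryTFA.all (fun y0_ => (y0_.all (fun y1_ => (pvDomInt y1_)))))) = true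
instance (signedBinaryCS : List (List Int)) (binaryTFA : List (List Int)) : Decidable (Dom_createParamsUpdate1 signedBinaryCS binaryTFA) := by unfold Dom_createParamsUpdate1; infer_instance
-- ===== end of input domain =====

-- B replaces A's triple loop over all (sample, gene, TF) triples by emitting only the three
-- blocks that actually produce parameters (sample 0: tfa/cs/b, sample 1: s/tfa, samples >= 2:
-- tfa columns), an asymptotically faster construction of the same list.

-- shared parameter-name formatters and Python-style indexing (exact under Pre_)
def pvTfaS (k i : Int) : String := "tfa[" ++ PySem.Int.toStr k ++ "," ++ PySem.Int.toStr i ++ "]"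
def pvCsS (j k : Int) : String := "cs[" ++ PySem.Int.toStr j ++ "," ++ PySem.Int.toStr k ++ "]"
def pvSS (j : Int) : String := "s[" ++ PySem.Int.toStr j ++ "]"
def pvBS (j : Int) : String := "b[" ++ PySem.Int.toStr j ++ "]"
def pvCsV (signedBinaryCS : List (List Int)) (j k : Int) : Int :=
  PySem.List.pyGetD (PySem.List.pyGetD signedBinaryCS j []) k 0
def pvTfaV (binaryTFA : List (List Int)) (k i : Int) : Int :=
  PySem.List.pyGetD (PySem.List.pyGetD binaryTFA k []) i 0

-- ===== PORT A =====
def createParamsUpdate1 (signedBinaryCS : List (List Int)) (binaryTFA : List (List Int)) : List String :=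
  let numGenes : Int := (signedBinaryCS.length : Int)
  let numTFs : Int := ((PySem.List.pyGetD signedBinaryCS 0 []).length : Int)
  let numSamples : Int := ((PySem.List.pyGetD binaryTFA 0 []).length : Int)
  (PySem.List.pyRange 0 numSamples 1).foldl (fun params i =>
    (PySem.List.pyRange 0 numGenes 1).foldl (fun params j =>
      let params := if i = 1 then params ++ [pvSS j] else params
      let st := (PySem.List.pyRange 0 numTFs 1).foldl (fun (st : List String × Int) k =>
        let numRep : Int := if pvCsV signedBinaryCS j k < 0 then st.2 + 1 else st.2
        let p := if j = 0 ∧ pvTfaV binaryTFA k i ≠ 0 then st.1 ++ [pvTfaS k i] else st.1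
        let p := if i = 0 ∧ pvCsV signedBinaryCS j k ≠ 0 then p ++ [pvCsS j k] else p
        (p, numRep)) (params, (0 : Int))
      if i = 0 ∧ st.2 = 0 then st.1 ++ [pvBS j] else st.1) params) []

-- ===== PORT B =====
def pvTfaCol (binaryTFA : List (List Int)) (numTFs i : Int) : List String :=
  ((PySem.List.pyRange 0 numTFs 1).filter (fun k => decide (pvTfaV binaryTFA k i ≠ 0))).map
    (fun k => pvTfaS k i)

def createParamsUpdate1_alt (signedBinaryCS : List (List Int)) (binaryTFA : List (List Int)) : List String :=
  let numGenes : Int := (signedBinaryCS.length : Int)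
  let numTFs : Int := ((PySem.List.pyGetD signedBinaryCS 0 []).length : Int)
  let numSamples : Int := ((PySem.List.pyGetD binaryTFA 0 []).length : Int)
  let block0 : List String :=
    if 0 < numSamples then
      (PySem.List.pyRange 0 numGenes 1).foldl (fun params j =>
        let row := PySem.List.pyGetD signedBinaryCS j []
        let params :=
          if j = 0 then
            params ++ (PySem.List.pyRange 0 numTFs 1).flatMap (fun k =>
              (if pvTfaV binaryTFA k 0 ≠ 0 then [pvTfaS k 0] else []) ++
              (if PySem.List.pyGetD row k 0 ≠ 0 then [pvCsS 0 k] else []))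
          else
            params ++ ((PySem.List.pyRange 0 numTFs 1).filter
              (fun k => decide (PySem.List.pyGetD row k 0 ≠ 0))).map (fun k => pvCsS j k)
        if (PySem.List.pyRange 0 numTFs 1).all (fun k => decide (0 ≤ PySem.List.pyGetD row k 0)) then
          params ++ [pvBS j]
        else params) []
    else []
  let block1 : List String :=
    if 1 < numSamples then
      (PySem.List.pyRange 0 numGenes 1).foldl (fun params j =>
        let params := params ++ [pvSS j]
        if j = 0 then params ++ pvTfaCol binaryTFA numTFs 1 else params) []
    else []
  let tail : List String :=
    (PySem.List.pyRange 2 numSamples 1).flatMap (fun i => pvTfaCol binaryTFA numTFs i)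
  block0 ++ block1 ++ tail

-- ===== PRECONDITION & SPEC =====
-- Pre_ = exactly the inputs where Python A returns: both matrices nonempty (A reads row 0 of
-- each), and, unless there are no samples at all, every gene row has at least numTFs entries,
-- binaryTFA has at least numTFs rows, and each of its first numTFs rows at least numSamples entries.
def Pre_createParamsUpdate1 (signedBinaryCS : List (List Int)) (binaryTFA : List (List Int)) : Prop :=
  signedBinaryCS ≠ [] ∧ binaryTFA ≠ [] ∧
  (binaryTFA.headI.length = 0 ∨
    ((∀ r ∈ signedBinaryCS, signedBinaryCS.headI.length ≤ r.length) ∧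
     signedBinaryCS.headI.length ≤ binaryTFA.length ∧
     (∀ r ∈ binaryTFA.take signedBinaryCS.headI.length, binaryTFA.headI.length ≤ r.length)))
instance (signedBinaryCS : List (List Int)) (binaryTFA : List (List Int)) : Decidable (Pre_createParamsUpdate1 signedBinaryCS binaryTFA) := by unfold Pre_createParamsUpdate1; infer_instance

def pvWitness_createParamsUpdate1 : List (List Int) × List (List Int) :=
  ([[1, -1], [0, 1]], [[1, 0, 1], [1, 1, 0]])

def Spec_createParamsUpdate1 (signedBinaryCS : List (List Int)) (binaryTFA : List (List Int)) (out : List String) : Prop := out = createParamsUpdate1_alt signedBinaryCS binaryTFA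
instance (signedBinaryCS : List (List Int)) (binaryTFA : List (List Int)) (out : List String) : Decidable (Spec_createParamsUpdate1 signedBinaryCS binaryTFA out) := by unfold Spec_createParamsUpdate1; infer_instance

-- ===== CLAIM (what is proved, stated in full; the proofs are below) =====
def Claim_equal_createParamsUpdate1 : Prop := ∀ (signedBinaryCS : List (List Int)) (binaryTFA : List (List Int)), Dom_createParamsUpdate1 signedBinaryCS binaryTFA → Pre_createParamsUpdate1 signedBinaryCS binaryTFA → Spec_createParamsUpdate1 signedBinaryCS binaryTFA (createParamsUpdate1 signedBinaryCS binaryTFA)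

-- ===== LEMMAS AND PROOFS =====

-- the list appended by A's inner k-loop at cell (i, j)
def pvKpart (signedBinaryCS binaryTFA : List (List Int)) (T i j : Int) : List String :=
  (PySem.List.pyRange 0 T 1).flatMap (fun k =>
    (if j = 0 ∧ pvTfaV binaryTFA k i ≠ 0 then [pvTfaS k i] else []) ++
    (if i = 0 ∧ pvCsV signedBinaryCS j k ≠ 0 then [pvCsS j k] else []))

-- numRepressors computed by A's inner k-loop
def pvNeg (signedBinaryCS : List (List Int)) (T j : Int) : Int :=
  ((PySem.List.pyRange 0 T 1).countP (fun k => decide (pvCsV signedBinaryCS j k < 0)) : Int)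

-- everything A appends during one (i, j) iteration
def pvCell (signedBinaryCS binaryTFA : List (List Int)) (T i j : Int) : List String :=
  (if i = 1 then [pvSS j] else []) ++ pvKpart signedBinaryCS binaryTFA T i j ++
  (if i = 0 ∧ pvNeg signedBinaryCS T j = 0 then [pvBS j] else [])

theorem pv_kfold (cs tfa : List (List Int)) (i j : Int) (l : List Int) (params : List String) (c : Int) :
    l.foldl (fun (st : List String × Int) k =>
      ((if i = 0 ∧ pvCsV cs j k ≠ 0 then
          (if j = 0 ∧ pvTfaV tfa k i ≠ 0 then st.1 ++ [pvTfaS k i] else st.1) ++ [pvCsS j k]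
        else (if j = 0 ∧ pvTfaV tfa k i ≠ 0 then st.1 ++ [pvTfaS k i] else st.1)),
       (if pvCsV cs j k < 0 then st.2 + 1 else st.2))) (params, c)
    = (params ++ l.flatMap (fun k =>
         (if j = 0 ∧ pvTfaV tfa k i ≠ 0 then [pvTfaS k i] else []) ++
         (if i = 0 ∧ pvCsV cs j k ≠ 0 then [pvCsS j k] else [])),
       c + (l.countP (fun k => decide (pvCsV cs j k < 0)) : Int)) := by
  induction l generalizing params c with
  | nil => simp
  | cons a l ih =>
    simp only [List.foldl_cons, ih, List.flatMap_cons, List.countP_cons]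
    rw [Prod.ext_iff]
    constructor
    · simp only []
      split_ifs <;> simp
    · simp only []
      simp only [decide_eq_true_eq]
      split_ifs <;> push_cast <;> omega

theorem pv_allneg (l : List Int) (v : Int → Int) :
    ((l.all (fun k => decide (0 ≤ v k))) = true) ↔ ((l.countP (fun k => decide (v k < 0)) : Int) = 0) := by
  simp only [List.all_eq_true, decide_eq_true_eq, Int.natCast_eq_zero, List.countP_eq_zero]
  constructor <;> intro h a ha <;> have := h a ha <;> omega


theorem pv_Anf (cs tfa : List (List Int)) :
    createParamsUpdate1 cs tfa =
      (PySem.List.pyRange 0 ((PySem.List.pyGetD tfa 0 []).length : Int) 1).flatMap (fun i =>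
        (PySem.List.pyRange 0 (cs.length : Int) 1).flatMap (fun j =>
          pvCell cs tfa ((PySem.List.pyGetD cs 0 []).length : Int) i j)) := by
  simp only [createParamsUpdate1, pv_kfold]
  trans ((PySem.List.pyRange 0 ((PySem.List.pyGetD tfa 0 []).length : Int) 1).foldl
          (fun (p : List String) (i : Int) =>
            p ++ (PySem.List.pyRange 0 (cs.length : Int) 1).flatMap
              (fun j => pvCell cs tfa ((PySem.List.pyGetD cs 0 []).length : Int) i j)) [])
  · apply List.foldl_ext
    intro p i hi
    trans ((PySem.List.pyRange 0 (cs.length : Int) 1).foldl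
            (fun (q : List String) (j : Int) =>
              q ++ pvCell cs tfa ((PySem.List.pyGetD cs 0 []).length : Int) i j) p)
    · apply List.foldl_ext
      intro q j hj
      simp only [zero_add, pvCell, pvKpart, pvNeg]
      split_ifs <;> simp [List.append_assoc]
    · rw [PySem.List.foldl_append_eq_flatMap]
  · rw [PySem.List.foldl_append_eq_flatMap, List.nil_append]

theorem pv_flatIf2 (l : List Int) (p : Int → Prop) [DecidablePred p] (f : Int → String) :
    l.flatMap (fun x => if p x then [] else [f x]) = (l.filter (fun x => !decide (p x))).map f := by
  induction l with
  | nil => simp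
  | cons a l ih =>
    by_cases h : p a <;> simp [h, ih]

theorem pv_cell_one (cs tfa : List (List Int)) (T j : Int) :
    pvCell cs tfa T 1 j = [pvSS j] ++ (if j = 0 then pvTfaCol tfa T 1 else []) := by
  by_cases hj : j = 0
  · subst hj
    simp [pvCell, pvKpart, pvTfaCol, pv_flatIf2]
  · simp [pvCell, pvKpart, hj]

theorem pv_cell_big (cs tfa : List (List Int)) (T i j : Int) (h2 : 2 ≤ i) :
    pvCell cs tfa T i j = if j = 0 then pvTfaCol tfa T i else [] := by
  have h0 : i ≠ 0 := by omega
  have h1 : i ≠ 1 := by omega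
  by_cases hj : j = 0
  · subst hj
    simp [pvCell, pvKpart, pvTfaCol, h0, h1, pv_flatIf2]
  · simp [pvCell, pvKpart, h0, h1, hj]

theorem pv_flat_cell_big (cs tfa : List (List Int)) (i : Int) (h2 : 2 ≤ i) :
    (PySem.List.pyRange 0 (cs.length : Int) 1).flatMap
        (fun j => pvCell cs tfa ((PySem.List.pyGetD cs 0 []).length : Int) i j)
      = pvTfaCol tfa ((PySem.List.pyGetD cs 0 []).length : Int) i := by
  cases cs with
  | nil =>
    simp [pvTfaCol, PySem.List.pyRange_one_eq_nil, PySem.List.pyGetD]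
  | cons r rs =>
    have hone : PySem.List.pyRange 0 1 1 = [0] := by decide
    rw [PySem.List.pyRange_one_append 0 1 ((r :: rs).length : Int) (by omega) (by simp),
        List.flatMap_append, hone]
    have hrest : (PySem.List.pyRange 1 ((r :: rs).length : Int) 1).flatMap
        (fun j => pvCell (r :: rs) tfa ((PySem.List.pyGetD (r :: rs) 0 []).length : Int) i j) = [] := by
      rw [List.flatMap_congr (g := fun _ => ([] : List String)) ?_]
      · simp
      · intro j hj
        rw [PySem.List.mem_pyRange_one] at hj
        rw [pv_cell_big _ _ _ _ _ h2, if_neg (by omega)]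
    rw [hrest, List.append_nil, List.flatMap_singleton, pv_cell_big _ _ _ _ _ h2, if_pos rfl]

theorem pv_block1 (cs tfa : List (List Int)) :
    List.foldl (fun params j =>
        if j = 0 then params ++ [pvSS j] ++ pvTfaCol tfa ((PySem.List.pyGetD cs 0 []).length : Int) 1
        else params ++ [pvSS j]) [] (PySem.List.pyRange 0 (cs.length : Int) 1)
    = (PySem.List.pyRange 0 (cs.length : Int) 1).flatMap
        (fun j => pvCell cs tfa ((PySem.List.pyGetD cs 0 []).length : Int) 1 j) := by
  trans (List.foldl (fun (q : List String) (j : Int) =>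
      q ++ pvCell cs tfa ((PySem.List.pyGetD cs 0 []).length : Int) 1 j) []
      (PySem.List.pyRange 0 (cs.length : Int) 1))
  · apply List.foldl_ext
    intro q j hj
    rw [pv_cell_one]
    by_cases h : j = 0 <;> simp [h, List.append_assoc]
  · rw [PySem.List.foldl_append_eq_flatMap, List.nil_append]

theorem pv_block0 (cs tfa : List (List Int)) :
    List.foldl
      (fun params j =>
        if ((PySem.List.pyRange 0 ((PySem.List.pyGetD cs 0 []).length : Int) 1).all fun k =>
              decide (0 ≤ PySem.List.pyGetD (PySem.List.pyGetD cs j []) k 0)) = true then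
          (if j = 0 then
              params ++
                List.flatMap
                  (fun k =>
                    (if pvTfaV tfa k 0 ≠ 0 then [pvTfaS k 0] else []) ++
                      if PySem.List.pyGetD (PySem.List.pyGetD cs j []) k 0 ≠ 0 then [pvCsS 0 k] else [])
                  (PySem.List.pyRange 0 ((PySem.List.pyGetD cs 0 []).length : Int) 1)
            else
              params ++
                List.map (fun k => pvCsS j k)
                  (List.filter (fun k => decide (PySem.List.pyGetD (PySem.List.pyGetD cs j []) k 0 ≠ 0))
                    (PySem.List.pyRange 0 ((PySem.List.pyGetD cs 0 []).length : Int) 1))) ++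
            [pvBS j]
        else
          if j = 0 then
            params ++
              List.flatMap
                (fun k =>
                  (if pvTfaV tfa k 0 ≠ 0 then [pvTfaS k 0] else []) ++
                    if PySem.List.pyGetD (PySem.List.pyGetD cs j []) k 0 ≠ 0 then [pvCsS 0 k] else [])
                (PySem.List.pyRange 0 ((PySem.List.pyGetD cs 0 []).length : Int) 1)
          else
            params ++
              List.map (fun k => pvCsS j k)
                (List.filter (fun k => decide (PySem.List.pyGetD (PySem.List.pyGetD cs j []) k 0 ≠ 0))
                  (PySem.List.pyRange 0 ((PySem.List.pyGetD cs 0 []).length : Int) 1)))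
      [] (PySem.List.pyRange 0 (cs.length : Int) 1)
    = (PySem.List.pyRange 0 (cs.length : Int) 1).flatMap
        (fun j => pvCell cs tfa ((PySem.List.pyGetD cs 0 []).length : Int) 0 j) := by
  trans (List.foldl (fun (q : List String) (j : Int) =>
      q ++ pvCell cs tfa ((PySem.List.pyGetD cs 0 []).length : Int) 0 j) []
      (PySem.List.pyRange 0 (cs.length : Int) 1))
  · apply List.foldl_ext
    intro q j hj
    simp only [pv_allneg]
    by_cases h0 : j = 0
    · subst h0
      simp only [pvCell, pvKpart, pvNeg, pvCsV, true_and]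
      split_ifs <;> try simp_all [List.append_assoc]
      all_goals
        rename_i hex hall
        obtain ⟨x, hx1, hx2, hx3⟩ := hex
        exact absurd (hall x hx1 hx2) (by omega)
    · simp only [pvCell, pvKpart, pvNeg, pvCsV, h0]
      split_ifs <;> try simp_all [pv_flatIf2, List.append_assoc]
      all_goals
        rename_i hex hall
        obtain ⟨x, hx1, hx2, hx3⟩ := hex
        exact absurd (hall x hx1 hx2) (by omega)
  · rw [PySem.List.foldl_append_eq_flatMap, List.nil_append]

theorem pv_AB (cs tfa : List (List Int)) :
    createParamsUpdate1 cs tfa = createParamsUpdate1_alt cs tfa := by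
  rw [pv_Anf]
  simp only [createParamsUpdate1_alt]
  rw [pv_block0 cs tfa, pv_block1 cs tfa]
  rcases hn : (PySem.List.pyGetD tfa 0 []).length with _ | n
  · simp [PySem.List.pyRange_one_eq_nil]
  · rcases n with _ | m
    · have h1 : ((0 + 1 : Nat) : Int) = 1 := by norm_num
      rw [h1]
      have hone : PySem.List.pyRange 0 (1 : Int) 1 = [0] := by decide
      have hnil : PySem.List.pyRange 2 (1 : Int) 1 = [] := by decide
      simp [hone, hnil]
    · have hS : (2 : Int) ≤ ((m + 2 : Nat) : Int) := by push_cast; omega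
      rw [PySem.List.pyRange_one_append 0 2 ((m + 2 : Nat) : Int) (by omega) hS,
          List.flatMap_append]
      have h02 : PySem.List.pyRange 0 2 1 = [0, 1] := by decide
      rw [h02]
      have htail : (PySem.List.pyRange 2 ((m + 2 : Nat) : Int) 1).flatMap
          (fun i => (PySem.List.pyRange 0 (cs.length : Int) 1).flatMap
            (fun j => pvCell cs tfa ((PySem.List.pyGetD cs 0 []).length : Int) i j))
          = (PySem.List.pyRange 2 ((m + 2 : Nat) : Int) 1).flatMap
            (fun i => pvTfaCol tfa ((PySem.List.pyGetD cs 0 []).length : Int) i) := by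
        apply List.flatMap_congr
        intro i hi
        rw [PySem.List.mem_pyRange_one] at hi
        exact pv_flat_cell_big cs tfa i hi.1
      rw [htail]
      rw [if_pos (by push_cast; omega), if_pos (by push_cast; omega)]
      simp [List.append_assoc, show ((m : Int) + 1 + 1) = (m : Int) + 2 from by ring]

-- ===== VERDICT (by name: the statement is the Claim_ definition above) =====
theorem createParamsUpdate1_spec : Claim_equal_createParamsUpdate1 := by
  intro signedBinaryCS binaryTFA _ _
  unfold Spec_createParamsUpdate1
  exact pv_AB signedBinaryCS binaryTFA
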